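-- pv_equiv track=rewrite | github.com/ahtakkatha/pymatgen | pymatgen/io/feff/inputs.py | pot_dict_from_string
-- ===== SOURCE A (Python) =====
-- def pot_dict_from_string(pot_data):
--     """
--     Creates atomic symbol/potential number dictionary
--     forward and reverse
--
--     Arg:
--         pot_data: potential data in string format
--
--     Returns:
--         forward and reverse atom symbol and potential number dictionaries.
--     """
--
--     pot_dict = {}
--     pot_dict_reverse = {}
--     begin = 0
--     ln = -1
--
--     for line in pot_data.split("\n"):
--         try:
--             if begin == 0 and line.split()[0] == "0":
--                 begin += 1
--                 ln = 0
--             if begin == 1: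
--                 ln += 1
--             if ln > 0:
--                 atom = line.split()[2]
--                 index = int(line.split()[0])
--                 pot_dict[atom] = index
--                 pot_dict_reverse[index] = atom
--         except (ValueError, IndexError):
--             pass
--     return pot_dict, pot_dict_reverse
-- ===== SOURCE B (Python) =====
-- def pot_dict_from_string(pot_data):
--     """
--     Creates atomic symbol/potential number dictionary
--     forward and reverse (find-start-then-process-suffix rewrite).
--     """
--     lines = pot_data.split("\n")
--     start = None
--     for i, line in enumerate(lines):
--         tokens = line.split()
--         if tokens and tokens[0] == "0":
--             start = i
--             break
--     pot_dict = {}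
--     pot_dict_reverse = {}
--     if start is not None:
--         for line in lines[start:]:
--             tokens = line.split()
--             try:
--                 atom = tokens[2]
--                 index = int(tokens[0])
--             except (ValueError, IndexError):
--                 continue
--             pot_dict[atom] = index
--             pot_dict_reverse[index] = atom
--     return pot_dict, pot_dict_reverse
-- ===== Notes on version B (the rewrite author's own statement) =====
-- stated objective: simpler
-- what changed: Replaces A's begin/ln flag machinery threaded through one loop-with-try over all lines by a two-phase structure: first find the index of the first line whose first token is "0", then process only that suffix of lines, parsing each line directly.
import Mathlib
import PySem

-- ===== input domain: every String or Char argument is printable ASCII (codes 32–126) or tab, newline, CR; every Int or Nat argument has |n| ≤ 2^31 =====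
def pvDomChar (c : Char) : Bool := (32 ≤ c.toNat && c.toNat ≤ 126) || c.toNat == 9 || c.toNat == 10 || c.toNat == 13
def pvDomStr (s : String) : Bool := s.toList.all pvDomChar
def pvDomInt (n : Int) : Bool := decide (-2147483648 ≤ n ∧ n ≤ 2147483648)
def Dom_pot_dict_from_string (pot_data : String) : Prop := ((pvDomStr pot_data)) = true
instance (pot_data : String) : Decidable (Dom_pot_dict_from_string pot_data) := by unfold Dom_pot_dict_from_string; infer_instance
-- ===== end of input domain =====

-- B replaces A's begin/ln flag machinery by find-the-trigger-line-then-process-the-suffix (objective: simpler).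

-- ===== PORT A =====
-- state: (pot_dict, pot_dict_reverse, begin, ln)
abbrev pvStA := PySem.Dict String Int × PySem.Dict Int String × Int × Int

-- the tail of A's try-block: 'if begin == 1: ln += 1' then 'if ln > 0: atom = …; index = int(…); store'
-- (a 'none' from pyGet?/ofChars? is the caught IndexError/ValueError: nothing stored, flags keep their updated values)
def pvStep23 (d : PySem.Dict String Int) (r : PySem.Dict Int String)
    (b l : Int) (toks : List (List Char)) : pvStA :=
  let l' := if b = 1 then l + 1 else l
  if 0 < l' then
    match PySem.List.pyGet? toks 2 with
    | none => (d, r, b, l')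
    | some a =>
      match PySem.List.pyGet? toks 0 with
      | none => (d, r, b, l')
      | some t0 =>
        match PySem.Int.ofChars? t0 with
        | none => (d, r, b, l')
        | some i => (d.insert (String.ofList a) i, r.insert i (String.ofList a), b, l')
  else (d, r, b, l')

-- one iteration of A's loop body (the try/except over one line)
def pvStepA (st : pvStA) (line : List Char) : pvStA :=
  match st with
  | (d, r, b, l) =>
    let toks := PySem.Chars.split₀ line
    if b = 0 then
      match toks with
      | [] => (d, r, b, l)        -- line.split()[0] raises IndexError: try aborted, state unchanged
      | t :: _ =>
        if t = ['0'] then pvStep23 d r 1 0 toks else pvStep23 d r b l toks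
    else pvStep23 d r b l toks

def pot_dict_from_string (pot_data : String) : (List (String × Int)) × (List (Int × String)) :=
  let lines := PySem.Chars.splitOn pot_data.toList ['\n']
  let st := lines.foldl pvStepA ((PySem.Dict.empty : PySem.Dict String Int),
                                 (PySem.Dict.empty : PySem.Dict Int String), 0, -1)
  (st.1.items, st.2.1.items)

-- ===== PORT B =====
-- Source B's first loop: index of the first line whose tokens start with "0" (None if no line matches)
def pvFindStart (lines : List (List Char)) : Option Nat :=
  match lines with
  | [] => none
  | line :: rest =>
    match PySem.Chars.split₀ line with
    | [] => (pvFindStart rest).map (· + 1)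
    | t :: _ => if t = ['0'] then some 0 else (pvFindStart rest).map (· + 1)

-- Source B's second loop body: try atom = tokens[2]; index = int(tokens[0]); store; except continue
def pvProcess (st : PySem.Dict String Int × PySem.Dict Int String) (line : List Char) :
    PySem.Dict String Int × PySem.Dict Int String :=
  let toks := PySem.Chars.split₀ line
  match PySem.List.pyGet? toks 2 with
  | none => st
  | some a =>
    match PySem.List.pyGet? toks 0 with
    | none => st
    | some t0 =>
      match PySem.Int.ofChars? t0 with
      | none => st
      | some i => (st.1.insert (String.ofList a) i, st.2.insert i (String.ofList a))

def pot_dict_from_string_alt (pot_data : String) : (List (String × Int)) × (List (Int × String)) :=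
  let lines := PySem.Chars.splitOn pot_data.toList ['\n']
  match pvFindStart lines with
  | none => ([], [])
  | some s =>
    let p := (lines.drop s).foldl pvProcess
      ((PySem.Dict.empty : PySem.Dict String Int), (PySem.Dict.empty : PySem.Dict Int String))
    (p.1.items, p.2.items)

-- ===== PRECONDITION & SPEC =====
def Spec_pot_dict_from_string (pot_data : String) (out : (List (String × Int)) × (List (Int × String))) : Prop := out = pot_dict_from_string_alt pot_data
instance (pot_data : String) (out : (List (String × Int)) × (List (Int × String))) : Decidable (Spec_pot_dict_from_string pot_data out) := by unfold Spec_pot_dict_from_string; infer_instance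

-- ===== CLAIM (what is proved, stated in full; the proofs are below) =====
def Claim_equal_pot_dict_from_string : Prop := ∀ (pot_data : String), Dom_pot_dict_from_string pot_data → Spec_pot_dict_from_string pot_data (pot_dict_from_string pot_data)

-- ===== LEMMAS AND PROOFS =====

-- one step of A's loop with begin = 1 is exactly one step of B's processing loop; ln stays positive
theorem pvStep23_one (d : PySem.Dict String Int) (r : PySem.Dict Int String) (l : Int)
    (hl : 0 ≤ l) (line : List Char) :
    pvStep23 d r 1 l (PySem.Chars.split₀ line) =
      ((pvProcess (d, r) line).1, (pvProcess (d, r) line).2, 1, l + 1) := by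
  have hpos : (0 : Int) < l + 1 := by omega
  cases h2 : PySem.List.pyGet? (PySem.Chars.split₀ line) 2 with
  | none => simp [pvStep23, pvProcess, h2, hpos]
  | some a =>
    cases h0 : PySem.List.pyGet? (PySem.Chars.split₀ line) 0 with
    | none => simp [pvStep23, pvProcess, h2, h0, hpos]
    | some t0 =>
      cases hi : PySem.Int.ofChars? t0 with
      | none => simp [pvStep23, pvProcess, h2, h0, hi, hpos]
      | some i => simp [pvStep23, pvProcess, h2, h0, hi, hpos]

-- once begin = 1 and ln ≥ 0, A's remaining fold is B's processing fold
theorem pvFoldA_one (lines : List (List Char)) :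
    ∀ (d : PySem.Dict String Int) (r : PySem.Dict Int String) (l : Int), 0 ≤ l →
    lines.foldl pvStepA (d, r, 1, l) =
      ((lines.foldl pvProcess (d, r)).1, (lines.foldl pvProcess (d, r)).2, 1,
        l + (lines.length : Int)) := by
  induction lines with
  | nil => intro d r l hl; simp
  | cons hd tl ih =>
    intro d r l hl
    have hstep : pvStepA (d, r, 1, l) hd =
        ((pvProcess (d, r) hd).1, (pvProcess (d, r) hd).2, 1, l + 1) := by
      simp only [pvStepA]
      rw [if_neg (by norm_num)]
      exact pvStep23_one d r l hl hd
    simp only [List.foldl_cons, hstep]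
    rw [ih (pvProcess (d, r) hd).1 (pvProcess (d, r) hd).2 (l + 1) (by omega)]
    simp only [List.length_cons]
    have h1 : ((tl.length + 1 : Nat) : Int) = (tl.length : Int) + 1 := by push_cast; ring
    have h2 : l + 1 + (tl.length : Int) = l + ((tl.length : Int) + 1) := by ring
    rw [h1, h2]

-- A's step before the trigger (begin = 0, ln = -1) on a non-trigger line leaves the state unchanged
theorem pvStep23_idle (d : PySem.Dict String Int) (r : PySem.Dict Int String)
    (toks : List (List Char)) :
    pvStep23 d r 0 (-1) toks = (d, r, 0, -1) := by
  simp [pvStep23]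

-- the main correspondence, by induction over the lines
theorem pvFoldA_main (lines : List (List Char)) :
    ∀ (d : PySem.Dict String Int) (r : PySem.Dict Int String),
    ∃ l' : Int,
      lines.foldl pvStepA (d, r, 0, -1) =
        (match pvFindStart lines with
         | none => (d, r, 0, -1)
         | some s =>
             (((lines.drop s).foldl pvProcess (d, r)).1,
              ((lines.drop s).foldl pvProcess (d, r)).2, 1, l')) := by
  induction lines with
  | nil => intro d r; exact ⟨-1, rfl⟩
  | cons hd tl ih =>
    intro d r
    cases htoks : PySem.Chars.split₀ hd with
    | nil =>
      have hstep : pvStepA (d, r, 0, -1) hd = (d, r, 0, -1) := by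
        simp [pvStepA, htoks]
      obtain ⟨l', hl'⟩ := ih d r
      refine ⟨l', ?_⟩
      simp only [List.foldl_cons, hstep, hl', pvFindStart, htoks]
      cases pvFindStart tl with
      | none => rfl
      | some s => simp
    | cons t ts =>
      by_cases ht : t = ['0']
      · -- trigger line
        have hstep : pvStepA (d, r, 0, -1) hd =
            ((pvProcess (d, r) hd).1, (pvProcess (d, r) hd).2, 1, 1) := by
          simp only [pvStepA, htoks, if_pos ht]
          norm_num
          have := pvStep23_one d r 0 (le_refl 0) hd
          rw [htoks] at this
          simpa using this
        refine ⟨1 + (tl.length : Int), ?_⟩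
        simp only [List.foldl_cons, hstep]
        rw [pvFoldA_one tl _ _ 1 (by omega)]
        simp [pvFindStart, htoks, if_pos ht]
      · -- non-trigger line
        have hstep : pvStepA (d, r, 0, -1) hd = (d, r, 0, -1) := by
          simp only [pvStepA, htoks, if_neg ht]
          norm_num
          exact pvStep23_idle d r (t :: ts)
        obtain ⟨l', hl'⟩ := ih d r
        refine ⟨l', ?_⟩
        simp only [List.foldl_cons, hstep, hl', pvFindStart, htoks, if_neg ht]
        cases pvFindStart tl with
        | none => rfl
        | some s => simp

-- ===== VERDICT (by name: the statement is the Claim_ definition above) =====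
theorem pot_dict_from_string_spec : Claim_equal_pot_dict_from_string := by
  intro pot_data _
  unfold Spec_pot_dict_from_string pot_dict_from_string pot_dict_from_string_alt
  obtain ⟨l', hl'⟩ := pvFoldA_main (PySem.Chars.splitOn pot_data.toList ['\n'])
    (PySem.Dict.empty : PySem.Dict String Int) (PySem.Dict.empty : PySem.Dict Int String)
  simp only [hl']
  cases hfs : pvFindStart (PySem.Chars.splitOn pot_data.toList ['\n']) with
  | none => simp [PySem.Dict.empty]
  | some s => simp
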